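-- pv_equiv track=rewrite | github.com/sesoo102/algorithm | adv_algo/problem solving/1953_arrest_prisoner.py | bfs
-- ===== SOURCE A (Python) =====
-- from collections import deque
--
-- dr = [-1, 1, 0, 0]
--
-- dc = [0, 0, -1, 1]
--
-- types = {
--     0: [0, 0, 0, 0],
--     1: [1, 1, 1, 1],
--     2: [1, 1, 0, 0],
--     3: [0, 0, 1, 1],
--     4: [1, 0, 0, 1],
--     5: [0, 1, 0, 1],
--     6: [0, 1, 1, 0],
--     7: [1, 0, 1, 0],
-- }
--
-- reverse_direction = {0: 1, 1: 0, 2: 3, 3: 2}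
--
-- def bfs(r, c, L, N, M, tunnel):
--     queue = deque([(r, c, 1)])
--     visited = [[0] * M for _ in range(N)]
--     visited[r][c] = 1
--     count = 1
--
--     while queue:
--         sr, sc, time = queue.popleft()
--
--         # 탈출 시간이 지나면 종료
--         if time >= L:
--             continue
--
--         # 현재 위치의 터널 구조 확인
--         dirs = types[tunnel[sr][sc]]
--
--         for d in range(4):
--             if dirs[d] == 0:
--                 continue
--
--             tr = sr + dr[d]
--             tc = sc + dc[d]
--             if 0 <= tr < N and 0 <= tc < M and visited[tr][tc] == 0:
--                 # 이동하려는 위치의 터널 확인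
--                 next_type = tunnel[tr][tc]
--                 if next_type == 0:
--                     continue
--
--                 # 이동할 터널이 현재 터널과 연결되어 있는지 확인
--                 next_dirs = types[next_type]
--                 # 반대 방향 연결 확인
--                 if next_dirs[reverse_direction[d]] == 1:
--                     visited[tr][tc] = 1
--                     count += 1
--                     queue.append((tr, tc, time + 1))
--
--     return count
-- ===== SOURCE B (Python) =====
-- # Fixed-point relaxation instead of BFS: no queue and no frontier at all.  Each of the
-- # up to L-1 rounds rebuilds the whole visited grid at once -- a cell becomes visited as
-- # soon as some already-visited in-bounds neighbour is connected to it through matching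
-- # tunnel openings -- and the loop stops early at a fixed point; the answer is the number
-- # of True cells.  Correct because round k's grid is exactly the set of cells at tunnel
-- # distance <= k from the start.  Objective: alternative algorithm (grid-sweep relaxation
-- # in place of queue-driven BFS).
-- dr = [-1, 1, 0, 0]
--
-- dc = [0, 0, -1, 1]
--
-- types = {
--     0: [0, 0, 0, 0],
--     1: [1, 1, 1, 1],
--     2: [1, 1, 0, 0],
--     3: [0, 0, 1, 1],
--     4: [1, 0, 0, 1],
--     5: [0, 1, 0, 1],
--     6: [0, 1, 1, 0],
--     7: [1, 0, 1, 0],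
-- }
--
-- reverse_direction = {0: 1, 1: 0, 2: 3, 3: 2}
--
-- def bfs(r, c, L, N, M, tunnel):
--     visited = [[False] * M for _ in range(N)]
--     visited[r][c] = True
--     for _ in range(1, L):
--         new = [[visited[i][j] or any(
--                     types[tunnel[i][j]][d] == 1
--                     and 0 <= i + dr[d] < N and 0 <= j + dc[d] < M
--                     and visited[i + dr[d]][j + dc[d]]
--                     and types[tunnel[i + dr[d]][j + dc[d]]][reverse_direction[d]] == 1
--                     for d in range(4))
--                 for j in range(M)] for i in range(N)]
--         if new == visited:
--             break
--         visited = new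
--     return sum(map(sum, visited))
-- ===== Notes on version B (the rewrite author's own statement) =====
-- stated objective: alternative
-- what changed: Replaces the queue-driven BFS entirely by fixed-point relaxation: no queue, no frontier and no per-node time tags -- each of up to L-1 rounds rebuilds the whole visited grid at once (a cell turns visited when a visited in-bounds neighbour connects to it through matching tunnel openings), stopping early at a fixed point, and the answer is the number of True cells.
-- outside the precondition, e.g. on bfs(-1, 0, 3, 2, 1, [[2], [2]]): A returns 2, B returns 2; on bfs(0, 0, 2, 1, 2, [[2, 9]]): A returns 1, B raises KeyError; on bfs(0, 0, 2, 1, 1, [[0], [5]]): A returns 1, B returns 1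
import Mathlib
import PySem

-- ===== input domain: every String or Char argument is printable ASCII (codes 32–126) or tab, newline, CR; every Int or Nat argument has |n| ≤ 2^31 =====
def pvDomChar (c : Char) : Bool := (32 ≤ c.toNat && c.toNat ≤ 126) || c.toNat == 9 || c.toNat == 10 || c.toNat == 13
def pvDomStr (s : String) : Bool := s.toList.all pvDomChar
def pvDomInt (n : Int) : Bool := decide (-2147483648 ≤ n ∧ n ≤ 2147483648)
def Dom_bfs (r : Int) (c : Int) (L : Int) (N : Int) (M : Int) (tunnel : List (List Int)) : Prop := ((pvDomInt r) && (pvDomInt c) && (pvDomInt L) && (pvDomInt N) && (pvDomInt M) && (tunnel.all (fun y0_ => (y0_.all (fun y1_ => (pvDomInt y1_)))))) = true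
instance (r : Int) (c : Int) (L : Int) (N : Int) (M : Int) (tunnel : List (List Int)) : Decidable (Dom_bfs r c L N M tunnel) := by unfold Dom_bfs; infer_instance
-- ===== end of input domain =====

-- B replaces A's queue-driven BFS by fixed-point relaxation: up to L-1 full-grid sweeps,
-- each turning a cell visited when a visited connected neighbour exists, stopping at a
-- fixed point; the result is the number of visited cells (same value on every Pre_ input).

-- ===== PORT A =====
def drA : List Int := [-1, 1, 0, 0]
def dcA : List Int := [0, 0, -1, 1]

-- the `types` dict; an argument outside 0..7 is a KeyError in Python (excluded by Pre_)
def typesA (t : Int) : List Int :=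
  if t = 0 then [0, 0, 0, 0]
  else if t = 1 then [1, 1, 1, 1]
  else if t = 2 then [1, 1, 0, 0]
  else if t = 3 then [0, 0, 1, 1]
  else if t = 4 then [1, 0, 0, 1]
  else if t = 5 then [0, 1, 0, 1]
  else if t = 6 then [0, 1, 1, 0]
  else if t = 7 then [1, 0, 1, 0]
  else []

-- the `reverse_direction` dict (only ever applied to 0..3)
def revDirA (d : Nat) : Nat := if d = 0 then 1 else if d = 1 then 0 else if d = 2 then 3 else 2

-- tunnel[i][j]; exact whenever 0 ≤ i < len tunnel and 0 ≤ j < len row (guaranteed under Pre_)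
def tGet (g : List (List Int)) (i j : Int) : Int := (g.getD i.toNat []).getD j.toNat 0

-- visited[i][j]; exact for the in-bounds indices the guards admit (default 1 = "blocked")
def vGet (v : List (List Int)) (i j : Int) : Int := (v.getD i.toNat []).getD j.toNat 1

-- visited[i][j] = 1
def vSet (v : List (List Int)) (i j : Int) : List (List Int) :=
  v.set i.toNat ((v.getD i.toNat []).set j.toNat 1)

-- number of unvisited cells: the termination measure of A's while loop
def vZeros (v : List (List Int)) : Nat := (v.map (fun row => row.count 0)).sum

-- body of A's `for d in range(4)` loop; state = (queue, visited, count)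
def stepA (N M : Int) (tunnel : List (List Int)) (sr sc time : Int)
    (st : List (Int × Int × Int) × List (List Int) × Int) (d : Nat) :
    List (Int × Int × Int) × List (List Int) × Int :=
  -- tr := sr + dr[d], tc := sc + dc[d] (inlined)
  if (typesA (tGet tunnel sr sc)).getD d 0 = 0 then st
  else
    if 0 ≤ sr + drA.getD d 0 ∧ sr + drA.getD d 0 < N ∧ 0 ≤ sc + dcA.getD d 0 ∧
        sc + dcA.getD d 0 < M ∧ vGet st.2.1 (sr + drA.getD d 0) (sc + dcA.getD d 0) = 0 then
      if tGet tunnel (sr + drA.getD d 0) (sc + dcA.getD d 0) = 0 then st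
      else if (typesA (tGet tunnel (sr + drA.getD d 0) (sc + dcA.getD d 0))).getD (revDirA d) 0 = 1 then
        (st.1 ++ [(sr + drA.getD d 0, sc + dcA.getD d 0, time + 1)],
         vSet st.2.1 (sr + drA.getD d 0) (sc + dcA.getD d 0), st.2.2 + 1)
      else st
    else st

-- A's while loop over the deque; state = (queue, visited, count).  The loop pops one
-- entry per iteration and the fuel passed by `bfs` (unvisited cells + 1) bounds the
-- number of iterations, so the fuel guard never fires (proved via runW below).
def runA (L N M : Int) (tunnel : List (List Int)) :
    Nat → List (Int × Int × Int) → List (List Int) → Int → Int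
  | _, [], _, cnt => cnt
  | 0, _ :: _, _, cnt => cnt
  | fuel + 1, (sr, sc, time) :: rest, v, cnt =>
    if L ≤ time then runA L N M tunnel fuel rest v cnt
    else
      let st := [0, 1, 2, 3].foldl (stepA N M tunnel sr sc time) (rest, v, cnt)
      runA L N M tunnel fuel st.1 st.2.1 st.2.2

def bfs (r : Int) (c : Int) (L : Int) (N : Int) (M : Int) (tunnel : List (List Int)) : Int :=
  let visited := vSet (List.replicate N.toNat (List.replicate M.toNat 0)) r c
  runA L N M tunnel (vZeros visited + 1) [(r, c, 1)] visited 1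

-- ===== PORT B =====
-- visited[i][j] for B's boolean matrix; exact for the in-bounds indices the guards admit
def vGetB (v : List (List Bool)) (i j : Int) : Bool := (v.getD i.toNat []).getD j.toNat true

-- visited[i][j] = True
def vSetB (v : List (List Bool)) (i j : Int) : List (List Bool) :=
  v.set i.toNat ((v.getD i.toNat []).set j.toNat true)

-- the `any(... for d in range(4))` generator of B's comprehension, at cell (i, j)
def entered (N M : Int) (tunnel : List (List Int)) (v : List (List Bool)) (i j : Int) : Bool :=
  [0, 1, 2, 3].any (fun d : Nat =>
    ((typesA (tGet tunnel i j)).getD d 0 == 1) &&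
    decide (0 ≤ i + drA.getD d 0) && decide (i + drA.getD d 0 < N) &&
    decide (0 ≤ j + dcA.getD d 0) && decide (j + dcA.getD d 0 < M) &&
    vGetB v (i + drA.getD d 0) (j + dcA.getD d 0) &&
    ((typesA (tGet tunnel (i + drA.getD d 0) (j + dcA.getD d 0))).getD (revDirA d) 0 == 1))

-- B's nested list comprehension: `new = [[visited[i][j] or any(...) for j ...] for i ...]`
def relaxGrid (N M : Int) (tunnel : List (List Int)) (v : List (List Bool)) : List (List Bool) :=
  (List.range N.toNat).map (fun i : Nat => (List.range M.toNat).map (fun j : Nat =>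
    vGetB v (i : Int) (j : Int) || entered N M tunnel v (i : Int) (j : Int)))

-- B's `sum(map(sum, visited))` (Python sums booleans as ints)
def popcount (v : List (List Bool)) : Int :=
  (v.map (fun row => (row.map (fun b => if b then (1 : Int) else 0)).sum)).sum

-- B's `for _ in range(1, L)` loop with its `if new == visited: break`
def runR (N M : Int) (tunnel : List (List Int)) : Nat → List (List Bool) → Int
  | 0, v => popcount v
  | k + 1, v =>
    let nv := relaxGrid N M tunnel v
    if nv = v then popcount v else runR N M tunnel k nv

def bfs_alt (r : Int) (c : Int) (L : Int) (N : Int) (M : Int) (tunnel : List (List Int)) : Int :=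
  let visited := vSetB (List.replicate N.toNat (List.replicate M.toNat false)) r c
  runR N M tunnel (L - 1).toNat visited

-- ===== PRECONDITION & SPEC =====
-- Pre_ admits (1) every input with L ≤ 1 and a start index Python accepts (both Pythons
-- return 1 there before ever reading the grid) and (2) the puzzle's natural domain: an N×M
-- grid of tunnel types 0..7 with the start in range.  Outside these a Python raises
-- IndexError/KeyError (B reads every cell, so junk values unreached by A raise in B), or
-- (when an invalid index/value is merely unreached, or a negative start index wraps
-- around) A returns a value that is an accident of Python's indexing, which the typed
-- ports cannot mirror.
def Pre_bfs (r : Int) (c : Int) (L : Int) (N : Int) (M : Int) (tunnel : List (List Int)) : Prop :=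
  (L ≤ 1 ∧ -N ≤ r ∧ r < N ∧ -M ≤ c ∧ c < M) ∨
  (0 ≤ r ∧ r < N ∧ 0 ≤ c ∧ c < M ∧ tunnel.length = N.toNat ∧
   (∀ row ∈ tunnel, row.length = M.toNat) ∧ (∀ row ∈ tunnel, ∀ x ∈ row, 0 ≤ x ∧ x ≤ 7))
instance (r : Int) (c : Int) (L : Int) (N : Int) (M : Int) (tunnel : List (List Int)) : Decidable (Pre_bfs r c L N M tunnel) := by unfold Pre_bfs; infer_instance

def pvWitness_bfs : Int × Int × Int × Int × Int × List (List Int) := (0, 0, 3, 2, 2, [[1, 1], [1, 1]])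

def Spec_bfs (r : Int) (c : Int) (L : Int) (N : Int) (M : Int) (tunnel : List (List Int)) (out : Int) : Prop := out = bfs_alt r c L N M tunnel
instance (r : Int) (c : Int) (L : Int) (N : Int) (M : Int) (tunnel : List (List Int)) (out : Int) : Decidable (Spec_bfs r c L N M tunnel out) := by unfold Spec_bfs; infer_instance

-- ===== CLAIM (what is proved, stated in full; the proofs are below) =====
def Claim_equal_bfs : Prop := ∀ (r : Int) (c : Int) (L : Int) (N : Int) (M : Int) (tunnel : List (List Int)), Dom_bfs r c L N M tunnel → Pre_bfs r c L N M tunnel → Spec_bfs r c L N M tunnel (bfs r c L N M tunnel)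

-- ===== LEMMAS AND PROOFS =====
-- Stage 1 (runA ≡ runB): A's deque traversal equals a level-synchronous frontier loop
-- runB (a pure proof device).  Stage 2 (runB ≡ runR): each frontier round produces
-- exactly the relaxation round's grid, by a frontier/closure invariant.

-- body of the frontier loop; state = (nxt, visited, count)
def stepB (N M : Int) (tunnel : List (List Int))
    (st : List (Int × Int) × List (List Bool) × Int) (cell : Int × Int) :
    List (Int × Int) × List (List Bool) × Int :=
  (PySem.List.enumerate (typesA (tGet tunnel cell.1 cell.2))).foldl
    (fun st2 dop =>
      if dop.2 ≠ 0 then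
        if 0 ≤ cell.1 + drA.getD dop.1.toNat 0 ∧ cell.1 + drA.getD dop.1.toNat 0 < N ∧
            0 ≤ cell.2 + dcA.getD dop.1.toNat 0 ∧ cell.2 + dcA.getD dop.1.toNat 0 < M ∧
            vGetB st2.2.1 (cell.1 + drA.getD dop.1.toNat 0) (cell.2 + dcA.getD dop.1.toNat 0) = false ∧
            tGet tunnel (cell.1 + drA.getD dop.1.toNat 0) (cell.2 + dcA.getD dop.1.toNat 0) ≠ 0 ∧
            (typesA (tGet tunnel (cell.1 + drA.getD dop.1.toNat 0) (cell.2 + dcA.getD dop.1.toNat 0))).getD (revDirA dop.1.toNat) 0 = 1 then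
          (st2.1 ++ [(cell.1 + drA.getD dop.1.toNat 0, cell.2 + dcA.getD dop.1.toNat 0)],
           vSetB st2.2.1 (cell.1 + drA.getD dop.1.toNat 0) (cell.2 + dcA.getD dop.1.toNat 0),
           st2.2.2 + 1)
        else st2
      else st2) st

-- the frontier loop itself
def runB (N M : Int) (tunnel : List (List Int)) :
    Nat → List (Int × Int) → List (List Bool) → Int → Int
  | 0, _, _, cnt => cnt
  | k + 1, frontier, v, cnt =>
    if frontier.isEmpty then cnt
    else
      let st := frontier.foldl (stepB N M tunnel) ([], v, cnt)
      runB N M tunnel k st.1 st.2.1 st.2.2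

-- ---------- Stage 1: runA = runB (deque vs synchronous frontier) ----------

-- termination support for runA (cited by its decreasing_by)
lemma countSet0 : ∀ (row : List Int) (m : Nat), row.getD m 1 = 0 →
    (row.set m 1).count 0 + 1 = row.count 0 := by
  intro row
  induction row with
  | nil => intro m h; simp [List.getD] at h
  | cons x xs ih =>
    intro m h
    cases m with
    | zero => simp [List.getD] at h; subst h; simp
    | succ m =>
      have hh : xs.getD m 1 = 0 := by simpa [List.getD] using h
      have := ih m hh
      simp only [List.set_cons_succ, List.count_cons]
      omega

lemma vZeros_vSet : ∀ (v : List (List Int)) (i j : Int), vGet v i j = 0 →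
    vZeros (vSet v i j) + 1 = vZeros v := by
  intro v i j h
  unfold vGet at h
  unfold vSet vZeros
  generalize hn : i.toNat = n at *
  clear hn
  induction v generalizing n with
  | nil => simp [List.getD] at h
  | cons row rest ih =>
    cases n with
    | zero =>
      simp only [List.getD_cons_zero] at h
      simp only [List.set, List.map, List.sum_cons, List.getD_cons_zero]
      have := countSet0 row j.toNat h
      omega
    | succ n =>
      simp only [List.getD_cons_succ] at h
      simp only [List.set, List.map, List.sum_cons, List.getD_cons_succ]
      have := ih n h
      omega

lemma stepA_cases (N M : Int) (tunnel : List (List Int)) (sr sc time : Int)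
    (st : List (Int × Int × Int) × List (List Int) × Int) (d : Nat) :
    stepA N M tunnel sr sc time st d = st ∨
      ∃ tr tc, vGet st.2.1 tr tc = 0 ∧
        stepA N M tunnel sr sc time st d
          = (st.1 ++ [(tr, tc, time + 1)], vSet st.2.1 tr tc, st.2.2 + 1) := by
  unfold stepA
  split
  · exact Or.inl rfl
  · split
    · split
      · exact Or.inl rfl
      · split
        · rename_i hguard _ _
          exact Or.inr ⟨_, _, hguard.2.2.2.2, rfl⟩
        · exact Or.inl rfl
    · exact Or.inl rfl

lemma stepA_fold_measure (N M : Int) (tunnel : List (List Int)) (sr sc time : Int) :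
    ∀ (ds : List Nat) (q : List (Int × Int × Int)) (v : List (List Int)) (cnt : Int),
      vZeros (ds.foldl (stepA N M tunnel sr sc time) (q, v, cnt)).2.1
          + (ds.foldl (stepA N M tunnel sr sc time) (q, v, cnt)).1.length
        = vZeros v + q.length
      ∧ q.length ≤ (ds.foldl (stepA N M tunnel sr sc time) (q, v, cnt)).1.length := by
  intro ds
  induction ds with
  | nil => intro q v cnt; simp
  | cons d ds ih =>
    intro q v cnt
    simp only [List.foldl_cons]
    rcases stepA_cases N M tunnel sr sc time (q, v, cnt) d with heq | ⟨tr, tc, hz0, heq⟩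
    · rw [heq]; exact ih q v cnt
    · rw [heq]
      have hz := vZeros_vSet v tr tc hz0
      have := ih (q ++ [(tr, tc, time + 1)]) (vSet v tr tc) (cnt + 1)
      simp only [List.length_append, List.length_cons, List.length_nil] at this ⊢
      omega

-- proof-side well-founded twin of runA (no fuel)
def runW (L N M : Int) (tunnel : List (List Int)) :
    List (Int × Int × Int) → List (List Int) → Int → Int
  | [], _, cnt => cnt
  | (sr, sc, time) :: rest, v, cnt =>
    if L ≤ time then runW L N M tunnel rest v cnt
    else
      let st := [0, 1, 2, 3].foldl (stepA N M tunnel sr sc time) (rest, v, cnt)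
      runW L N M tunnel st.1 st.2.1 st.2.2
termination_by q v _ => (vZeros v, q.length)
decreasing_by
  · apply Prod.Lex.right; simp
  · have h := stepA_fold_measure N M tunnel sr sc time [0, 1, 2, 3] rest v cnt
    rcases Nat.lt_or_ge (vZeros ([0, 1, 2, 3].foldl (stepA N M tunnel sr sc time) (rest, v, cnt)).2.1) (vZeros v) with hlt | hge
    · exact Prod.Lex.left _ _ hlt
    · have he : vZeros ([0, 1, 2, 3].foldl (stepA N M tunnel sr sc time) (rest, v, cnt)).2.1 = vZeros v := by omega
      rw [he]; apply Prod.Lex.right; simp only [List.length_cons]; omega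

-- with sufficient fuel, runA is runW
lemma runA_eq_runW (L N M : Int) (tunnel : List (List Int)) :
    ∀ (fuel : Nat) (q : List (Int × Int × Int)) (v : List (List Int)) (cnt : Int),
      vZeros v + q.length ≤ fuel →
      runA L N M tunnel fuel q v cnt = runW L N M tunnel q v cnt := by
  intro fuel
  induction fuel with
  | zero =>
    intro q v cnt h
    cases q with
    | nil => simp [runA, runW]
    | cons x rest => simp at h
  | succ fuel ih =>
    intro q v cnt h
    cases q with
    | nil => simp [runA, runW]
    | cons x rest =>
      obtain ⟨sr, sc, time⟩ := x
      show (if L ≤ time then runA L N M tunnel fuel rest v cnt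
            else runA L N M tunnel fuel _ _ _) = _
      rw [runW]
      by_cases hL : L ≤ time
      · rw [if_pos hL, if_pos hL]
        apply ih
        simp only [List.length_cons] at h
        omega
      · rw [if_neg hL, if_neg hL]
        have hm := stepA_fold_measure N M tunnel sr sc time [0, 1, 2, 3] rest v cnt
        apply ih
        simp only [List.length_cons] at h
        omega



-- tag a list of coordinates with a time stamp (the shape of A's queue segments)
def tagT (t : Int) (l : List (Int × Int)) : List (Int × Int × Int) :=
  l.map (fun p => (p.1, p.2, t))

lemma tagT_append (t : Int) (l1 l2 : List (Int × Int)) :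
    tagT t (l1 ++ l2) = tagT t l1 ++ tagT t l2 := by
  simp [tagT]

-- A's 0/1 visited matrix viewed as a boolean one
def toB (v : List (List Int)) : List (List Bool) :=
  v.map (fun row => row.map (fun x => !(x == 0)))

lemma toB_row (v : List (List Int)) (n : Nat) :
    (toB v).getD n [] = (v.getD n []).map (fun x => !(x == 0)) := by
  unfold toB
  rw [List.getD_eq_getElem?_getD, List.getElem?_map, List.getD_eq_getElem?_getD]
  cases v[n]? with
  | none => simp
  | some row => simp

lemma vGetB_toB (v : List (List Int)) (i j : Int) :
    vGetB (toB v) i j = !(vGet v i j == 0) := by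
  unfold vGetB vGet
  rw [toB_row]
  generalize v.getD i.toNat [] = row
  rw [List.getD_eq_getElem?_getD, List.getElem?_map, List.getD_eq_getElem?_getD]
  cases row[j.toNat]? with
  | none => simp
  | some x => simp

lemma vSetB_toB (v : List (List Int)) (i j : Int) :
    vSetB (toB v) i j = toB (vSet v i j) := by
  unfold vSetB vSet
  rw [toB_row, show toB (v.set i.toNat ((v.getD i.toNat []).set j.toNat 1))
      = (toB v).set i.toNat (((v.getD i.toNat []).set j.toNat 1).map (fun x => !(x == 0))) by
    unfold toB; rw [List.map_set], List.map_set]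
  norm_num
  rfl

-- A's per-direction step with the tunnel-openness value abstracted out
def stepA2 (N M : Int) (tunnel : List (List Int)) (sr sc time : Int) (d : Nat) (op : Int)
    (st : List (Int × Int × Int) × List (List Int) × Int) :
    List (Int × Int × Int) × List (List Int) × Int :=
  if op = 0 then st
  else
    if 0 ≤ sr + drA.getD d 0 ∧ sr + drA.getD d 0 < N ∧ 0 ≤ sc + dcA.getD d 0 ∧
        sc + dcA.getD d 0 < M ∧ vGet st.2.1 (sr + drA.getD d 0) (sc + dcA.getD d 0) = 0 then
      if tGet tunnel (sr + drA.getD d 0) (sc + dcA.getD d 0) = 0 then st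
      else if (typesA (tGet tunnel (sr + drA.getD d 0) (sc + dcA.getD d 0))).getD (revDirA d) 0 = 1 then
        (st.1 ++ [(sr + drA.getD d 0, sc + dcA.getD d 0, time + 1)],
         vSet st.2.1 (sr + drA.getD d 0) (sc + dcA.getD d 0), st.2.2 + 1)
      else st
    else st

-- the frontier-side per-direction step likewise
def stepB2 (N M : Int) (tunnel : List (List Int)) (sr sc : Int) (d : Nat) (op : Int)
    (st2 : List (Int × Int) × List (List Bool) × Int) :
    List (Int × Int) × List (List Bool) × Int :=
  if op ≠ 0 then
    if 0 ≤ sr + drA.getD d 0 ∧ sr + drA.getD d 0 < N ∧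
        0 ≤ sc + dcA.getD d 0 ∧ sc + dcA.getD d 0 < M ∧
        vGetB st2.2.1 (sr + drA.getD d 0) (sc + dcA.getD d 0) = false ∧
        tGet tunnel (sr + drA.getD d 0) (sc + dcA.getD d 0) ≠ 0 ∧
        (typesA (tGet tunnel (sr + drA.getD d 0) (sc + dcA.getD d 0))).getD (revDirA d) 0 = 1 then
      (st2.1 ++ [(sr + drA.getD d 0, sc + dcA.getD d 0)],
       vSetB st2.2.1 (sr + drA.getD d 0) (sc + dcA.getD d 0), st2.2.2 + 1)
    else st2
  else st2

lemma stepA_eq (N M : Int) (tunnel : List (List Int)) (sr sc time : Int)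
    (st : List (Int × Int × Int) × List (List Int) × Int) (d : Nat) :
    stepA N M tunnel sr sc time st d
      = stepA2 N M tunnel sr sc time d ((typesA (tGet tunnel sr sc)).getD d 0) st := rfl

lemma stepB_eq (N M : Int) (tunnel : List (List Int)) (sr sc : Int)
    (st : List (Int × Int) × List (List Bool) × Int) :
    stepB N M tunnel st (sr, sc)
      = (PySem.List.enumerate (typesA (tGet tunnel sr sc))).foldl
          (fun st2 dop => stepB2 N M tunnel sr sc dop.1.toNat dop.2 st2) st := rfl

-- state simulation: A's (queue, visited, count) vs the frontier (nxt, visited, count)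
def SimSt (time : Int) (q0 : List (Int × Int × Int)) (n0 : List (Int × Int))
    (a : List (Int × Int × Int) × List (List Int) × Int)
    (b : List (Int × Int) × List (List Bool) × Int) : Prop :=
  ∃ adds : List (Int × Int),
    a.1 = q0 ++ tagT (time + 1) adds ∧ b.1 = n0 ++ adds ∧
    b.2.1 = toB a.2.1 ∧ b.2.2 = a.2.2

lemma dir_sim (N M : Int) (tunnel : List (List Int)) (sr sc time : Int)
    (q0 : List (Int × Int × Int)) (n0 : List (Int × Int)) (d : Nat) (op : Int)
    (a : List (Int × Int × Int) × List (List Int) × Int)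
    (b : List (Int × Int) × List (List Bool) × Int)
    (h : SimSt time q0 n0 a b) :
    SimSt time q0 n0 (stepA2 N M tunnel sr sc time d op a)
      (stepB2 N M tunnel sr sc d op b) := by
  obtain ⟨adds, ha1, hb1, hv, hc⟩ := h
  unfold stepA2 stepB2
  by_cases hop : op = 0
  · subst hop
    rw [if_pos rfl, if_neg (by simp)]
    exact ⟨adds, ha1, hb1, hv, hc⟩
  · rw [if_neg hop, if_pos hop]
    have hvis : vGetB b.2.1 (sr + drA.getD d 0) (sc + dcA.getD d 0) = false
        ↔ vGet a.2.1 (sr + drA.getD d 0) (sc + dcA.getD d 0) = 0 := by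
      rw [hv, vGetB_toB]
      simp
    by_cases hg : 0 ≤ sr + drA.getD d 0 ∧ sr + drA.getD d 0 < N ∧ 0 ≤ sc + dcA.getD d 0 ∧
        sc + dcA.getD d 0 < M ∧ vGet a.2.1 (sr + drA.getD d 0) (sc + dcA.getD d 0) = 0
    · rw [if_pos hg]
      obtain ⟨g1, g2, g3, g4, g5⟩ := hg
      by_cases hnt : tGet tunnel (sr + drA.getD d 0) (sc + dcA.getD d 0) = 0
      · rw [if_pos hnt, if_neg (fun hcon => hcon.2.2.2.2.2.1 hnt)]
        exact ⟨adds, ha1, hb1, hv, hc⟩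
      · rw [if_neg hnt]
        by_cases hrev : (typesA (tGet tunnel (sr + drA.getD d 0) (sc + dcA.getD d 0))).getD (revDirA d) 0 = 1
        · rw [if_pos hrev, if_pos ⟨g1, g2, g3, g4, hvis.mpr g5, hnt, hrev⟩]
          refine ⟨adds ++ [(sr + drA.getD d 0, sc + dcA.getD d 0)], ?_, ?_, ?_, ?_⟩
          · simp only [ha1, tagT_append, List.append_assoc]; rfl
          · simp only [hb1, List.append_assoc]
          · simp only [hv, vSetB_toB]
          · simp only [hc]
        · rw [if_neg hrev, if_neg (fun hcon => hrev hcon.2.2.2.2.2.2)]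
          exact ⟨adds, ha1, hb1, hv, hc⟩
    · rw [if_neg hg,
        if_neg (fun hcon => hg ⟨hcon.1, hcon.2.1, hcon.2.2.1, hcon.2.2.2.1, hvis.mp hcon.2.2.2.2.1⟩)]
      exact ⟨adds, ha1, hb1, hv, hc⟩

lemma typesA_shape (t : Int) : typesA t = [] ∨ ∃ a b c d : Int, typesA t = [a, b, c, d] := by
  unfold typesA
  split_ifs <;> first
    | exact Or.inl rfl
    | exact Or.inr ⟨_, _, _, _, rfl⟩

lemma stepA2_zero (N M : Int) (tunnel : List (List Int)) (sr sc time : Int) (d : Nat)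
    (st : List (Int × Int × Int) × List (List Int) × Int) :
    stepA2 N M tunnel sr sc time d 0 st = st := by
  simp [stepA2]

-- one whole cell: A's four-direction loop vs the frontier enumerate loop
lemma cell_sim (N M : Int) (tunnel : List (List Int)) (sr sc time : Int)
    (q0 : List (Int × Int × Int)) (n0 : List (Int × Int))
    (a : List (Int × Int × Int) × List (List Int) × Int)
    (b : List (Int × Int) × List (List Bool) × Int)
    (h : SimSt time q0 n0 a b) :
    SimSt time q0 n0 ([0, 1, 2, 3].foldl (stepA N M tunnel sr sc time) a)
      (stepB N M tunnel b (sr, sc)) := by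
  rw [stepB_eq]
  have hfold : [0, 1, 2, 3].foldl (stepA N M tunnel sr sc time) a
      = [0, 1, 2, 3].foldl
          (fun st (d : Nat) => stepA2 N M tunnel sr sc time d ((typesA (tGet tunnel sr sc)).getD d 0) st) a := by
    simp only [List.foldl_cons, List.foldl_nil, stepA_eq]
  rw [hfold]
  rcases typesA_shape (tGet tunnel sr sc) with h0 | ⟨x0, x1, x2, x3, h4⟩
  · rw [h0]
    simp only [List.foldl_cons, List.foldl_nil, List.getD, List.getElem?_nil, Option.getD_none,
      stepA2_zero, PySem.List.enumerate_nil]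
    exact h
  · rw [h4]
    simp only [List.foldl_cons, List.foldl_nil, PySem.List.enumerate_cons, PySem.List.enumerate_nil]
    norm_num [List.getD]
    exact dir_sim N M tunnel sr sc time q0 n0 3 x3 _ _
      (dir_sim N M tunnel sr sc time q0 n0 2 x2 _ _
        (dir_sim N M tunnel sr sc time q0 n0 1 x1 _ _
          (dir_sim N M tunnel sr sc time q0 n0 0 x0 _ _ h)))

-- one whole round: pops of all time-t cells vs the frontier fold
lemma round_sim (L N M : Int) (tunnel : List (List Int)) (t : Int) (ht : t < L) :
    ∀ (cells f2 nxt : List (Int × Int)) (v : List (List Int)) (cnt : Int),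
      ∃ (adds : List (Int × Int)) (v' : List (List Int)),
        (cells.foldl (stepB N M tunnel) (nxt, toB v, cnt)).1 = nxt ++ adds ∧
        (cells.foldl (stepB N M tunnel) (nxt, toB v, cnt)).2.1 = toB v' ∧
        runW L N M tunnel (tagT t cells ++ tagT (t + 1) f2) v cnt
          = runW L N M tunnel (tagT (t + 1) (f2 ++ adds)) v'
              (cells.foldl (stepB N M tunnel) (nxt, toB v, cnt)).2.2 := by
  intro cells
  induction cells with
  | nil =>
    intro f2 nxt v cnt
    exact ⟨[], v, by simp, rfl, by simp [tagT]⟩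
  | cons cell cells ih =>
    intro f2 nxt v cnt
    obtain ⟨sr, sc⟩ := cell
    have hsim : SimSt t (tagT t cells ++ tagT (t + 1) f2) nxt
        (tagT t cells ++ tagT (t + 1) f2, v, cnt) (nxt, toB v, cnt) :=
      ⟨[], by simp [tagT], by simp, rfl, rfl⟩
    have hcell := cell_sim N M tunnel sr sc t _ _ _ _ hsim
    obtain ⟨adds1, ha1, hb1, hv1, hc1⟩ := hcell
    set stA := [0, 1, 2, 3].foldl (stepA N M tunnel sr sc t)
      (tagT t cells ++ tagT (t + 1) f2, v, cnt) with hstA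
    set stB := stepB N M tunnel (nxt, toB v, cnt) (sr, sc) with hstB
    have hrun : runW L N M tunnel (tagT t ((sr, sc) :: cells) ++ tagT (t + 1) f2) v cnt
        = runW L N M tunnel stA.1 stA.2.1 stA.2.2 := by
      show runW L N M tunnel ((sr, sc, t) :: (tagT t cells ++ tagT (t + 1) f2)) v cnt = _
      rw [runW]
      rw [if_neg (by omega)]
    have hq : stA.1 = tagT t cells ++ tagT (t + 1) (f2 ++ adds1) := by
      rw [ha1, tagT_append, List.append_assoc]
    have hBpair : stB = (nxt ++ adds1, toB stA.2.1, stA.2.2) := by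
      rw [← hb1, ← hv1, ← hc1]
    obtain ⟨adds2, v', hfb, hfv, hrun2⟩ := ih (f2 ++ adds1) (nxt ++ adds1) stA.2.1 stA.2.2
    refine ⟨adds1 ++ adds2, v', ?_, ?_, ?_⟩
    · show (((sr, sc) :: cells).foldl (stepB N M tunnel) (nxt, toB v, cnt)).1 = _
      rw [List.foldl_cons, ← hstB, hBpair, hfb, List.append_assoc]
    · show (((sr, sc) :: cells).foldl (stepB N M tunnel) (nxt, toB v, cnt)).2.1 = toB v'
      rw [List.foldl_cons, ← hstB, hBpair]
      exact hfv
    · rw [hrun, hq, hrun2]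
      show _ = runW L N M tunnel (tagT (t + 1) (f2 ++ (adds1 ++ adds2))) v'
        (((sr, sc) :: cells).foldl (stepB N M tunnel) (nxt, toB v, cnt)).2.2
      rw [List.foldl_cons, ← hstB, hBpair, ← List.append_assoc]

lemma runW_drain (L N M : Int) (tunnel : List (List Int)) (t : Int) (ht : L ≤ t) :
    ∀ (cells : List (Int × Int)) (v : List (List Int)) (cnt : Int),
      runW L N M tunnel (tagT t cells) v cnt = cnt := by
  intro cells
  induction cells with
  | nil => intro v cnt; rw [tagT]; simp [runW]
  | cons cell cells ih =>
    intro v cnt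
    obtain ⟨sr, sc⟩ := cell
    show runW L N M tunnel ((sr, sc, t) :: tagT t cells) v cnt = cnt
    rw [runW, if_pos ht]
    exact ih v cnt

lemma main_sim (L N M : Int) (tunnel : List (List Int)) :
    ∀ (k : Nat) (t : Int), (L - t).toNat = k →
      ∀ (cells : List (Int × Int)) (v : List (List Int)) (cnt : Int),
        runW L N M tunnel (tagT t cells) v cnt = runB N M tunnel k cells (toB v) cnt := by
  intro k
  induction k with
  | zero =>
    intro t hk cells v cnt
    rw [runW_drain L N M tunnel t (by omega), runB]
  | succ k ih =>
    intro t hk cells v cnt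
    have ht : t < L := by omega
    rw [runB]
    cases cells with
    | nil =>
      simp only [List.isEmpty_nil, if_true]
      rw [tagT]
      simp [runW]
    | cons cell cells =>
      rw [if_neg (by simp)]
      obtain ⟨adds, v', hfb, hfv, hrun⟩ :=
        round_sim L N M tunnel t ht (cell :: cells) [] [] v cnt
      have h1 : runW L N M tunnel (tagT t (cell :: cells)) v cnt
          = runW L N M tunnel (tagT (t + 1) ([] ++ adds)) v'
              ((cell :: cells).foldl (stepB N M tunnel) ([], toB v, cnt)).2.2 := by
        rw [show tagT t (cell :: cells) = tagT t (cell :: cells) ++ tagT (t + 1) [] by simp [tagT]]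
        exact hrun
      show _ = runB N M tunnel k ((cell :: cells).foldl (stepB N M tunnel) ([], toB v, cnt)).1
        ((cell :: cells).foldl (stepB N M tunnel) ([], toB v, cnt)).2.1
        ((cell :: cells).foldl (stepB N M tunnel) ([], toB v, cnt)).2.2
      rw [h1, hfb, hfv]
      exact ih (t + 1) (by omega) ([] ++ adds) v' _

lemma toB_init (r c N M : Int) :
    toB (vSet (List.replicate N.toNat (List.replicate M.toNat 0)) r c)
      = vSetB (List.replicate N.toNat (List.replicate M.toNat false)) r c := by
  rw [show List.replicate N.toNat (List.replicate M.toNat false)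
      = toB (List.replicate N.toNat (List.replicate M.toNat (0 : Int))) by
    simp [toB, List.map_replicate]]
  rw [vSetB_toB]

-- ---------- Stage 2: runB = runR (frontier rounds vs relaxation rounds) ----------

def inb (N M : Int) (w : Int × Int) : Prop := 0 ≤ w.1 ∧ w.1 < N ∧ 0 ≤ w.2 ∧ w.2 < M

-- one directed tunnel connection, in direction d
def edgeD (tunnel : List (List Int)) (u : Int × Int) (d : Nat) (w : Int × Int) : Prop :=
  w.1 = u.1 + drA.getD d 0 ∧ w.2 = u.2 + dcA.getD d 0 ∧
  (typesA (tGet tunnel u.1 u.2)).getD d 0 ≠ 0 ∧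
  tGet tunnel w.1 w.2 ≠ 0 ∧
  (typesA (tGet tunnel w.1 w.2)).getD (revDirA d) 0 = 1

def edge (tunnel : List (List Int)) (u w : Int × Int) : Prop :=
  edgeD tunnel u 0 w ∨ edgeD tunnel u 1 w ∨ edgeD tunnel u 2 w ∨ edgeD tunnel u 3 w

def Shaped (N M : Int) (v : List (List Bool)) : Prop :=
  v.length = N.toNat ∧ ∀ row ∈ v, row.length = M.toNat

-- uniform description of one fold segment: frontier grows by `adds`, the grid gains
-- exactly the cells of `adds`, which are exactly the unvisited in-bounds cells
-- satisfying P, and the count tracks popcount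
def ExpandsP (N M : Int) (P : Int × Int → Prop)
    (st st' : List (Int × Int) × List (List Bool) × Int) : Prop :=
  ∃ adds : List (Int × Int),
    st'.1 = st.1 ++ adds ∧
    (∀ a b : Int, 0 ≤ a → 0 ≤ b →
      (vGetB st'.2.1 a b = true ↔ vGetB st.2.1 a b = true ∨ (a, b) ∈ adds)) ∧
    (∀ w ∈ adds, inb N M w ∧ vGetB st.2.1 w.1 w.2 = false ∧ P w) ∧
    (∀ w, inb N M w → vGetB st.2.1 w.1 w.2 = false → P w → w ∈ adds) ∧
    (st.2.2 = popcount st.2.1 → st'.2.2 = popcount st'.2.1) ∧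
    (Shaped N M st.2.1 → Shaped N M st'.2.1)

lemma typesA_01 (t : Int) (d : Nat) :
    (typesA t).getD d 0 = 0 ∨ (typesA t).getD d 0 = 1 := by
  unfold typesA
  split_ifs <;> rcases d with _ | _ | _ | _ | d <;> simp [List.getD]

lemma typesA_zero_getD (d : Nat) : (typesA 0).getD d 0 = 0 := by
  unfold typesA
  rw [if_pos rfl]
  rcases d with _ | _ | _ | _ | d <;> simp [List.getD]

-- B-grid pointwise update
lemma row_getD_set_true (row : List Bool) (m : Nat) (h : row.getD m true = false) (k : Nat) :
    (row.set m true).getD k true = ((k == m) || row.getD k true) := by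
  induction row generalizing m k with
  | nil => simp [List.getD] at h
  | cons x xs ih =>
    cases m with
    | zero =>
      simp only [List.getD_cons_zero] at h
      cases k with
      | zero => simp [List.getD]
      | succ k => simp [List.getD]
    | succ m =>
      simp only [List.getD_cons_succ] at h
      cases k with
      | zero => simp [List.getD]
      | succ k =>
        simp only [List.set_cons_succ, List.getD_cons_succ]
        rw [ih m h k]
        simp

lemma vGetB_vSetB (v : List (List Bool)) (i j : Int) (h : vGetB v i j = false) (a b : Int) :
    vGetB (vSetB v i j) a b
      = (((a.toNat == i.toNat) && (b.toNat == j.toNat)) || vGetB v a b) := by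
  unfold vGetB vSetB
  unfold vGetB at h
  have hi : i.toNat < v.length := by
    by_contra hcon
    have hrow0 : v.getD i.toNat [] = [] := by
      rw [List.getD_eq_getElem?_getD, List.getElem?_eq_none (by omega)]
      rfl
    rw [hrow0] at h
    simp [List.getD] at h
  by_cases hrow : a.toNat = i.toNat
  · have houter : (v.set i.toNat ((v.getD i.toNat []).set j.toNat true)).getD a.toNat []
        = (v.getD i.toNat []).set j.toNat true := by
      rw [hrow, List.getD_eq_getElem?_getD, List.getElem?_set_self hi]
      rfl
    rw [houter, row_getD_set_true _ _ h b.toNat, hrow]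
    simp
  · have houter : (v.set i.toNat ((v.getD i.toNat []).set j.toNat true)).getD a.toNat []
        = v.getD a.toNat [] := by
      rw [List.getD_eq_getElem?_getD, List.getElem?_set_ne (fun he => hrow he.symm),
        ← List.getD_eq_getElem?_getD]
    rw [houter]
    simp [hrow]

lemma popcount_row_set (row : List Bool) (m : Nat) (h : row.getD m true = false) :
    ((row.set m true).map (fun b => if b then (1 : Int) else 0)).sum
      = (row.map (fun b => if b then (1 : Int) else 0)).sum + 1 := by
  induction row generalizing m with
  | nil => simp [List.getD] at h
  | cons x xs ih =>
    cases m with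
    | zero =>
      simp only [List.getD_cons_zero] at h
      subst h
      simp [add_comm]
    | succ m =>
      simp only [List.getD_cons_succ] at h
      simp only [List.set_cons_succ, List.map_cons, List.sum_cons, ih m h]
      ring

lemma popcount_vSetB (v : List (List Bool)) (i j : Int) (h : vGetB v i j = false) :
    popcount (vSetB v i j) = popcount v + 1 := by
  unfold vGetB at h
  unfold vSetB popcount
  generalize hn : i.toNat = n at *
  clear hn
  induction v generalizing n with
  | nil => simp [List.getD] at h
  | cons row rest ih =>
    cases n with
    | zero =>
      simp only [List.getD_cons_zero] at h
      simp only [List.set, List.map, List.sum_cons, List.getD_cons_zero]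
      rw [popcount_row_set row j.toNat h]
      ring
    | succ n =>
      simp only [List.getD_cons_succ] at h
      simp only [List.set, List.map, List.sum_cons, List.getD_cons_succ]
      rw [ih n h]
      ring

lemma shaped_vSetB (N M : Int) (v : List (List Bool)) (i j : Int) (h : Shaped N M v) :
    Shaped N M (vSetB v i j) := by
  by_cases hin : i.toNat < v.length
  · obtain ⟨hl, hr⟩ := h
    refine ⟨by simpa [vSetB] using hl, ?_⟩
    intro row hrow
    unfold vSetB at hrow
    rcases List.mem_or_eq_of_mem_set hrow with hmem | heq
    · exact hr row hmem
    · subst heq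
      rw [List.length_set, List.getD_eq_getElem?_getD, List.getElem?_eq_getElem hin]
      exact hr _ (List.getElem_mem hin)
  · unfold vSetB
    rw [List.set_eq_of_length_le (by omega)]
    exact h

-- composition and trivial cases of ExpandsP
lemma ExpandsP_id (N M : Int) (P : Int × Int → Prop)
    (st : List (Int × Int) × List (List Bool) × Int)
    (hP : ∀ w, inb N M w → vGetB st.2.1 w.1 w.2 = false → ¬ P w) :
    ExpandsP N M P st st :=
  ⟨[], by simp, by simp, by simp, fun w hi hu hw => absurd hw (hP w hi hu), id, id⟩

lemma ExpandsP_iff (N M : Int) (P Q : Int × Int → Prop)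
    (st st' : List (Int × Int) × List (List Bool) × Int)
    (h : ExpandsP N M P st st') (hiff : ∀ w, P w ↔ Q w) :
    ExpandsP N M Q st st' := by
  obtain ⟨adds, h1, h2, h3, h4, h5, h6⟩ := h
  exact ⟨adds, h1, h2, fun w hw => ⟨(h3 w hw).1, (h3 w hw).2.1, (hiff w).mp (h3 w hw).2.2⟩,
    fun w hi hu hq => h4 w hi hu ((hiff w).mpr hq), h5, h6⟩

lemma ExpandsP_trans (N M : Int) (P Q : Int × Int → Prop)
    (st st' st'' : List (Int × Int) × List (List Bool) × Int)
    (h1 : ExpandsP N M P st st') (h2 : ExpandsP N M Q st' st'') :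
    ExpandsP N M (fun w => P w ∨ Q w) st st'' := by
  obtain ⟨a1, e1, g1, c1, d1, p1, s1⟩ := h1
  obtain ⟨a2, e2, g2, c2, d2, p2, s2⟩ := h2
  refine ⟨a1 ++ a2, by rw [e2, e1, List.append_assoc], ?_, ?_, ?_, fun h => p2 (p1 h), fun h => s2 (s1 h)⟩
  · intro a b ha hb
    rw [g2 a b ha hb, g1 a b ha hb, List.mem_append]
    tauto
  · intro w hw
    rcases List.mem_append.mp hw with hw1 | hw2
    · exact ⟨(c1 w hw1).1, (c1 w hw1).2.1, Or.inl (c1 w hw1).2.2⟩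
    · obtain ⟨hi, hu', hq⟩ := c2 w hw2
      have hu : vGetB st.2.1 w.1 w.2 = false := by
        by_contra hcon
        have : vGetB st'.2.1 w.1 w.2 = true :=
          (g1 w.1 w.2 hi.1 hi.2.2.1).mpr (Or.inl (by
            cases hb : vGetB st.2.1 w.1 w.2
            · exact absurd hb hcon
            · rfl))
        rw [this] at hu'
        exact Bool.true_eq_false.mp hu' |>.elim
      exact ⟨hi, hu, Or.inr hq⟩
  · intro w hi hu hpq
    rcases hpq with hp | hq
    · exact List.mem_append.mpr (Or.inl (d1 w hi hu hp))
    · by_cases hmid : vGetB st'.2.1 w.1 w.2 = true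
      · have := (g1 w.1 w.2 hi.1 hi.2.2.1).mp hmid
        rcases this with hv | hm
        · rw [hv] at hu; exact absurd hu (by simp)
        · exact List.mem_append.mpr (Or.inl hm)
      · exact List.mem_append.mpr (Or.inr (d2 w hi (by
          cases hb : vGetB st'.2.1 w.1 w.2
          · rfl
          · exact absurd hb hmid) hq))

-- one direction of the frontier step realises ExpandsP for its edgeD
lemma stepB2_expands (N M : Int) (tunnel : List (List Int)) (sr sc : Int) (d : Nat) (op : Int)
    (hop : op = (typesA (tGet tunnel sr sc)).getD d 0)
    (st2 : List (Int × Int) × List (List Bool) × Int) :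
    ExpandsP N M (edgeD tunnel (sr, sc) d) st2 (stepB2 N M tunnel sr sc d op st2) := by
  unfold stepB2
  by_cases hop0 : op = 0
  · rw [if_neg (by simpa using hop0)]
    apply ExpandsP_id
    intro w _ _ hw
    exact hw.2.2.1 (by rw [← hop, hop0])
  · rw [if_pos hop0]
    by_cases hg : 0 ≤ sr + drA.getD d 0 ∧ sr + drA.getD d 0 < N ∧
        0 ≤ sc + dcA.getD d 0 ∧ sc + dcA.getD d 0 < M ∧
        vGetB st2.2.1 (sr + drA.getD d 0) (sc + dcA.getD d 0) = false ∧
        tGet tunnel (sr + drA.getD d 0) (sc + dcA.getD d 0) ≠ 0 ∧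
        (typesA (tGet tunnel (sr + drA.getD d 0) (sc + dcA.getD d 0))).getD (revDirA d) 0 = 1
    · rw [if_pos hg]
      obtain ⟨g1, g2, g3, g4, g5, g6, g7⟩ := hg
      refine ⟨[(sr + drA.getD d 0, sc + dcA.getD d 0)], rfl, ?_, ?_, ?_, ?_, ?_⟩
      · intro a b ha hb
        rw [vGetB_vSetB _ _ _ g5 a b]
        simp only [List.mem_singleton, Bool.or_eq_true, beq_iff_eq, Bool.and_eq_true,
          Prod.mk.injEq]
        constructor
        · rintro (⟨h1, h2⟩ | hv)
          · exact Or.inr ⟨by omega, by omega⟩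
          · exact Or.inl hv
        · rintro (hv | ⟨h1, h2⟩)
          · exact Or.inr hv
          · exact Or.inl ⟨by omega, by omega⟩
      · intro w hw
        rw [List.mem_singleton] at hw
        subst hw
        exact ⟨⟨g1, g2, g3, g4⟩, g5, rfl, rfl, by rw [← hop]; exact hop0, g6, g7⟩
      · intro w _ _ he
        rw [List.mem_singleton]
        obtain ⟨e1, e2, _, _, _⟩ := he
        exact Prod.ext e1 e2
      · intro hc
        show st2.2.2 + 1 = popcount (vSetB st2.2.1 _ _)
        rw [popcount_vSetB _ _ _ g5, hc]
      · exact shaped_vSetB N M st2.2.1 _ _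
    · rw [if_neg hg]
      apply ExpandsP_id
      intro w hi hu hw
      obtain ⟨e1, e2, e3, e4, e5⟩ := hw
      obtain ⟨i1, i2, i3, i4⟩ := hi
      apply hg
      rw [← e1, ← e2]
      exact ⟨i1, i2, i3, i4, hu, e4, e5⟩

-- a whole cell of the frontier fold realises ExpandsP for `edge`
lemma stepB_expands (N M : Int) (tunnel : List (List Int)) (sr sc : Int)
    (st : List (Int × Int) × List (List Bool) × Int) :
    ExpandsP N M (edge tunnel (sr, sc)) st (stepB N M tunnel st (sr, sc)) := by
  rw [stepB_eq]
  rcases typesA_shape (tGet tunnel sr sc) with h0 | ⟨x0, x1, x2, x3, h4⟩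
  · rw [h0]
    simp only [PySem.List.enumerate_nil, List.foldl_nil]
    apply ExpandsP_id
    intro w _ _ hw
    have hz : ∀ d : Nat, ¬ edgeD tunnel (sr, sc) d w := by
      intro d hd
      apply hd.2.2.1
      show (typesA (tGet tunnel (sr, sc).1 (sr, sc).2)).getD d 0 = 0
      simp only []
      rw [h0]
      simp [List.getD]
    rcases hw with hd | hd | hd | hd
    · exact hz 0 hd
    · exact hz 1 hd
    · exact hz 2 hd
    · exact hz 3 hd
  · rw [h4]
    simp only [PySem.List.enumerate_cons, PySem.List.enumerate_nil, List.foldl_cons,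
      List.foldl_nil]
    norm_num
    have hop : ∀ d : Nat, x0 = (typesA (tGet tunnel sr sc)).getD 0 0 ∧
        x1 = (typesA (tGet tunnel sr sc)).getD 1 0 ∧
        x2 = (typesA (tGet tunnel sr sc)).getD 2 0 ∧
        x3 = (typesA (tGet tunnel sr sc)).getD 3 0 := by
      intro d
      rw [h4]
      simp [List.getD]
    obtain ⟨o0, o1, o2, o3⟩ := hop 0
    have e0 := stepB2_expands N M tunnel sr sc 0 x0 o0 st
    have e1 := stepB2_expands N M tunnel sr sc 1 x1 o1 (stepB2 N M tunnel sr sc 0 x0 st)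
    have e2 := stepB2_expands N M tunnel sr sc 2 x2 o2
      (stepB2 N M tunnel sr sc 1 x1 (stepB2 N M tunnel sr sc 0 x0 st))
    have e3 := stepB2_expands N M tunnel sr sc 3 x3 o3
      (stepB2 N M tunnel sr sc 2 x2 (stepB2 N M tunnel sr sc 1 x1 (stepB2 N M tunnel sr sc 0 x0 st)))
    refine ExpandsP_iff N M _ _ _ _
      (ExpandsP_trans N M _ _ _ _ _
        (ExpandsP_trans N M _ _ _ _ _
          (ExpandsP_trans N M _ _ _ _ _ e0 e1) e2) e3) ?_
    intro w
    unfold edge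
    tauto

-- the frontier fold over a list of cells
lemma fold_expands (N M : Int) (tunnel : List (List Int)) :
    ∀ (F : List (Int × Int)) (st : List (Int × Int) × List (List Bool) × Int),
      ExpandsP N M (fun w => ∃ u ∈ F, edge tunnel u w) st (F.foldl (stepB N M tunnel) st) := by
  intro F
  induction F with
  | nil =>
    intro st
    simp only [List.foldl_nil]
    apply ExpandsP_id
    rintro w _ _ ⟨u, hu, _⟩
    simp at hu
  | cons u F ih =>
    intro st
    rw [List.foldl_cons]
    have h1 : ExpandsP N M (edge tunnel u) st (stepB N M tunnel st u) := by
      obtain ⟨su, cu⟩ := u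
      exact stepB_expands N M tunnel su cu st
    refine ExpandsP_iff N M _ _ _ _
      (ExpandsP_trans N M _ _ _ _ _ h1 (ih (stepB N M tunnel st u))) ?_
    intro w
    constructor
    · rintro (h | ⟨x, hx, he⟩)
      · exact ⟨u, List.mem_cons_self, h⟩
      · exact ⟨x, List.mem_cons_of_mem _ hx, he⟩
    · rintro ⟨x, hx, he⟩
      rcases List.mem_cons.mp hx with heq | hx'
      · exact Or.inl (heq ▸ he)
      · exact Or.inr ⟨x, hx', he⟩

-- direction bookkeeping: reversing a direction negates the offsets
lemma revDir_facts (d : Nat) (hd : d < 4) :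
    drA.getD (revDirA d) 0 = -(drA.getD d 0) ∧ dcA.getD (revDirA d) 0 = -(dcA.getD d 0) ∧
    revDirA (revDirA d) = d ∧ revDirA d < 4 := by
  interval_cases d <;> decide

lemma typesA_one_ne_zero (t : Int) (d : Nat) (h : (typesA t).getD d 0 = 1) : t ≠ 0 := by
  intro ht
  rw [ht, typesA_zero_getD] at h
  exact absurd h (by decide)

lemma edge_iff (tunnel : List (List Int)) (u w : Int × Int) :
    edge tunnel u w ↔ ∃ d : Nat, d < 4 ∧ edgeD tunnel u d w := by
  unfold edge
  constructor
  · rintro (h | h | h | h)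
    exacts [⟨0, by omega, h⟩, ⟨1, by omega, h⟩, ⟨2, by omega, h⟩, ⟨3, by omega, h⟩]
  · rintro ⟨d, hd, h⟩
    interval_cases d
    · exact Or.inl h
    · exact Or.inr (Or.inl h)
    · exact Or.inr (Or.inr (Or.inl h))
    · exact Or.inr (Or.inr (Or.inr h))

lemma entered_iff_exists (N M : Int) (tunnel : List (List Int)) (v : List (List Bool))
    (i j : Int) :
    entered N M tunnel v i j = true ↔ ∃ d : Nat, d < 4 ∧
      ((typesA (tGet tunnel i j)).getD d 0 = 1 ∧
       0 ≤ i + drA.getD d 0 ∧ i + drA.getD d 0 < N ∧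
       0 ≤ j + dcA.getD d 0 ∧ j + dcA.getD d 0 < M ∧
       vGetB v (i + drA.getD d 0) (j + dcA.getD d 0) = true ∧
       (typesA (tGet tunnel (i + drA.getD d 0) (j + dcA.getD d 0))).getD (revDirA d) 0 = 1) := by
  unfold entered
  simp only [List.any_cons, List.any_nil, Bool.or_false, Bool.or_eq_true, Bool.and_eq_true,
    beq_iff_eq, decide_eq_true_eq]
  constructor
  · rintro (h | h | h | h)
    exacts [⟨0, by omega, by tauto⟩, ⟨1, by omega, by tauto⟩, ⟨2, by omega, by tauto⟩,
      ⟨3, by omega, by tauto⟩]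
  · rintro ⟨d, hd, h⟩
    interval_cases d
    · exact Or.inl (by tauto)
    · exact Or.inr (Or.inl (by tauto))
    · exact Or.inr (Or.inr (Or.inl (by tauto)))
    · exact Or.inr (Or.inr (Or.inr (by tauto)))

-- `entered` in terms of `edge`
lemma entered_char (N M : Int) (tunnel : List (List Int)) (v : List (List Bool)) (i j : Int) :
    entered N M tunnel v i j = true
      ↔ ∃ u : Int × Int, inb N M u ∧ vGetB v u.1 u.2 = true ∧ edge tunnel u (i, j) := by
  rw [entered_iff_exists]
  constructor
  · rintro ⟨d, hd, h1, h2, h3, h4, h5, h6, h7⟩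
    obtain ⟨hdr, hdc, hrr, hlt⟩ := revDir_facts d hd
    refine ⟨(i + drA.getD d 0, j + dcA.getD d 0), ⟨h2, h3, h4, h5⟩, h6, ?_⟩
    refine (edge_iff tunnel _ _).mpr ⟨revDirA d, hlt, ?_, ?_, ?_, ?_, ?_⟩
    · show i = (i + drA.getD d 0) + drA.getD (revDirA d) 0
      rw [hdr]; ring
    · show j = (j + dcA.getD d 0) + dcA.getD (revDirA d) 0
      rw [hdc]; ring
    · exact fun hz => absurd h7 (by rw [hz]; decide)
    · exact typesA_one_ne_zero _ d h1
    · rw [hrr]; exact h1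
  · rintro ⟨u, hiu, hvu, he⟩
    obtain ⟨d', hd', e1, e2, e3, e4, e5⟩ := (edge_iff tunnel u (i, j)).mp he
    obtain ⟨hdr, hdc, hrr, hlt⟩ := revDir_facts d' hd'
    have hu1 : i + drA.getD (revDirA d') 0 = u.1 := by
      rw [hdr]
      have : (i, j).1 = u.1 + drA.getD d' 0 := e1
      simp only [] at this
      omega
    have hu2 : j + dcA.getD (revDirA d') 0 = u.2 := by
      rw [hdc]
      have : (i, j).2 = u.2 + dcA.getD d' 0 := e2
      simp only [] at this
      omega
    refine ⟨revDirA d', hlt, ?_, ?_, ?_, ?_, ?_, ?_, ?_⟩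
    · exact e5
    · rw [hu1]; exact hiu.1
    · rw [hu1]; exact hiu.2.1
    · rw [hu2]; exact hiu.2.2.1
    · rw [hu2]; exact hiu.2.2.2
    · rw [hu1, hu2]; exact hvu
    · rw [hu1, hu2, hrr]
      rcases typesA_01 (tGet tunnel u.1 u.2) d' with hz | ho
      · exact absurd hz e3
      · exact ho

-- pointwise description of the relaxation round
lemma vGetB_relax (N M : Int) (tunnel : List (List Int)) (v : List (List Bool))
    (_hN : 0 ≤ N) (_hM : 0 ≤ M) (a b : Nat) (ha : a < N.toNat) (hb : b < M.toNat) :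
    vGetB (relaxGrid N M tunnel v) (a : Int) (b : Int)
      = (vGetB v (a : Int) (b : Int) || entered N M tunnel v (a : Int) (b : Int)) := by
  unfold relaxGrid
  unfold vGetB
  rw [show ((a : Int)).toNat = a from Int.toNat_natCast a,
    show ((b : Int)).toNat = b from Int.toNat_natCast b]
  have hrow : ((List.range N.toNat).map (fun i : Nat => (List.range M.toNat).map (fun j : Nat =>
        (v.getD (i : Int).toNat []).getD (j : Int).toNat true
          || entered N M tunnel v (i : Int) (j : Int)))).getD a []
      = (List.range M.toNat).map (fun j : Nat =>
        (v.getD (a : Int).toNat []).getD (j : Int).toNat true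
          || entered N M tunnel v (a : Int) (j : Int)) := by
    rw [List.getD_eq_getElem?_getD, List.getElem?_map, List.getElem?_range ha]
    rfl
  rw [hrow, List.getD_eq_getElem?_getD, List.getElem?_map, List.getElem?_range hb]
  simp [Int.toNat_natCast]

lemma shaped_relax (N M : Int) (tunnel : List (List Int)) (v : List (List Bool)) :
    Shaped N M (relaxGrid N M tunnel v) := by
  constructor
  · simp [relaxGrid]
  · intro row hrow
    simp only [relaxGrid, List.mem_map] at hrow
    obtain ⟨i, _, hrow⟩ := hrow
    rw [← hrow]
    simp

-- two shaped grids that agree pointwise in bounds are equal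
lemma grid_ext (N M : Int) (v w : List (List Bool)) (hv : Shaped N M v) (hw : Shaped N M w)
    (h : ∀ a b : Nat, a < N.toNat → b < M.toNat →
      vGetB v (a : Int) (b : Int) = vGetB w (a : Int) (b : Int)) :
    v = w := by
  apply List.ext_getElem?
  intro n
  by_cases hn : n < N.toNat
  · have hnv : n < v.length := by rw [hv.1]; exact hn
    have hnw : n < w.length := by rw [hw.1]; exact hn
    rw [List.getElem?_eq_getElem hnv, List.getElem?_eq_getElem hnw]
    have hrv : v[n].length = M.toNat := hv.2 _ (List.getElem_mem hnv)
    have hrw : w[n].length = M.toNat := hw.2 _ (List.getElem_mem hnw)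
    congr 1
    apply List.ext_getElem?
    intro m
    by_cases hm : m < M.toNat
    · have hmv : m < v[n].length := by rw [hrv]; exact hm
      have hmw : m < w[n].length := by rw [hrw]; exact hm
      rw [List.getElem?_eq_getElem hmv, List.getElem?_eq_getElem hmw]
      have hpt := h n m hn hm
      unfold vGetB at hpt
      have hvrow : v.getD n [] = v[n] := by
        rw [List.getD_eq_getElem?_getD, List.getElem?_eq_getElem hnv]; rfl
      have hwrow : w.getD n [] = w[n] := by
        rw [List.getD_eq_getElem?_getD, List.getElem?_eq_getElem hnw]; rfl
      rw [Int.toNat_natCast, Int.toNat_natCast, hvrow, hwrow,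
        List.getD_eq_getElem?_getD, List.getElem?_eq_getElem hmv,
        List.getD_eq_getElem?_getD, List.getElem?_eq_getElem hmw] at hpt
      simp only [Option.getD_some] at hpt
      rw [hpt]
    · rw [List.getElem?_eq_none (by omega), List.getElem?_eq_none (by omega)]
  · rw [List.getElem?_eq_none (by rw [hv.1]; omega), List.getElem?_eq_none (by rw [hw.1]; omega)]

-- the frontier/closure invariant tying a frontier state to its grid
def InvF (N M : Int) (tunnel : List (List Int)) (F : List (Int × Int))
    (v : List (List Bool)) (cnt : Int) : Prop :=
  Shaped N M v ∧ cnt = popcount v ∧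
  (∀ w ∈ F, inb N M w ∧ vGetB v w.1 w.2 = true) ∧
  (∀ u w : Int × Int, inb N M u → inb N M w → vGetB v u.1 u.2 = true → u ∉ F →
    edge tunnel u w → vGetB v w.1 w.2 = true)

lemma runB_empty (N M : Int) (tunnel : List (List Int)) :
    ∀ (k : Nat) (v : List (List Bool)) (cnt : Int), runB N M tunnel k [] v cnt = cnt := by
  intro k v cnt
  cases k <;> simp [runB]

-- Stage-2 main simulation
lemma part2 (N M : Int) (tunnel : List (List Int)) (hN : 0 ≤ N) (hM : 0 ≤ M) :
    ∀ (k : Nat) (F : List (Int × Int)) (v : List (List Bool)) (cnt : Int),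
      InvF N M tunnel F v cnt → runB N M tunnel k F v cnt = runR N M tunnel k v := by
  intro k
  induction k with
  | zero =>
    intro F v cnt hInv
    show cnt = popcount v
    exact hInv.2.1
  | succ k ih =>
    intro F v cnt hInv
    obtain ⟨hShape, hCnt, hFront, hClos⟩ := hInv
    have hrunR : runR N M tunnel (k + 1) v
        = if relaxGrid N M tunnel v = v then popcount v
          else runR N M tunnel k (relaxGrid N M tunnel v) := rfl
    by_cases hF : F = []
    · subst hF
      rw [runB]
      simp only [List.isEmpty_nil, if_true]
      have hfix : relaxGrid N M tunnel v = v := by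
        apply grid_ext N M _ _ (shaped_relax N M tunnel v) hShape
        intro a b ha hb
        rw [vGetB_relax N M tunnel v hN hM a b ha hb]
        cases hv : vGetB v (a : Int) (b : Int)
        · simp only [Bool.false_or]
          cases he : entered N M tunnel v (a : Int) (b : Int)
          · rfl
          · exfalso
            obtain ⟨u, hiu, hvu, hedge⟩ := (entered_char N M tunnel v _ _).mp he
            have hw : vGetB v ((a : Int), (b : Int)).1 ((a : Int), (b : Int)).2 = true :=
              hClos u ((a : Int), (b : Int)) hiu
                ⟨Int.natCast_nonneg a, by omega, Int.natCast_nonneg b, by omega⟩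
                hvu (by simp) hedge
            rw [hv] at hw
            exact absurd hw (by decide)
        · simp
      rw [hrunR, if_pos hfix]
      exact hCnt
    · rw [runB]
      rw [if_neg (by simpa [List.isEmpty_iff] using hF)]
      obtain ⟨adds, hA, hB, hC, hD, hE, hS⟩ := fold_expands N M tunnel F ([], v, cnt)
      set st := F.foldl (stepB N M tunnel) ([], v, cnt) with hst
      have hst1 : st.1 = adds := by simpa using hA
      have hcnt' : st.2.2 = popcount st.2.1 := hE hCnt
      have hshape' : Shaped N M st.2.1 := hS hShape
      have hgrid : relaxGrid N M tunnel v = st.2.1 := by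
        apply grid_ext N M _ _ (shaped_relax N M tunnel v) hshape'
        intro a b ha hb
        rw [vGetB_relax N M tunnel v hN hM a b ha hb]
        have hiff := hB (a : Int) (b : Int) (Int.natCast_nonneg a) (Int.natCast_nonneg b)
        rw [Bool.eq_iff_iff]
        constructor
        · intro hor
          simp only [Bool.or_eq_true] at hor
          rcases hor with hvis | hent
          · exact hiff.mpr (Or.inl hvis)
          · obtain ⟨u, hiu, hvu, hedge⟩ := (entered_char N M tunnel v _ _).mp hent
            by_cases huF : u ∈ F
            · cases hvab : vGetB v (a : Int) (b : Int)
              · exact hiff.mpr (Or.inr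
                  (hD ((a : Int), (b : Int))
                    ⟨Int.natCast_nonneg a, by omega, Int.natCast_nonneg b, by omega⟩
                    hvab ⟨u, huF, hedge⟩))
              · exact hiff.mpr (Or.inl hvab)
            · exact hiff.mpr (Or.inl
                (hClos u ((a : Int), (b : Int)) hiu
                  ⟨Int.natCast_nonneg a, by omega, Int.natCast_nonneg b, by omega⟩
                  hvu huF hedge))
        · intro hstv
          rcases hiff.mp hstv with hvis | hmem
          · rw [hvis]; simp
          · obtain ⟨hiw, _, u, huF, hedge⟩ := hC _ hmem
            have hent : entered N M tunnel v (a : Int) (b : Int) = true :=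
              (entered_char N M tunnel v _ _).mpr
                ⟨u, (hFront u huF).1, (hFront u huF).2, hedge⟩
            rw [hent]; simp
      have hInv' : InvF N M tunnel adds st.2.1 st.2.2 := by
        refine ⟨hshape', hcnt', ?_, ?_⟩
        · intro w hw
          obtain ⟨hiw, _, _⟩ := hC w hw
          refine ⟨hiw, ?_⟩
          have := (hB w.1 w.2 hiw.1 hiw.2.2.1).mpr (Or.inr (by simpa using hw))
          simpa using this
        · intro u w hiu hiw hvu hunot hedge
          have hvu' : vGetB v u.1 u.2 = true := by
            rcases (hB u.1 u.2 hiu.1 hiu.2.2.1).mp (by simpa using hvu) with h | h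
            · exact h
            · exact absurd (by simpa using h) hunot
          cases hvw : vGetB v w.1 w.2
          · by_cases huF : u ∈ F
            · have := hD w hiw hvw ⟨u, huF, hedge⟩
              have := (hB w.1 w.2 hiw.1 hiw.2.2.1).mpr (Or.inr (by simpa using this))
              simpa using this
            · have := hClos u w hiu hiw hvu' huF hedge
              rw [this] at hvw
              exact absurd hvw (by decide)
          · have := (hB w.1 w.2 hiw.1 hiw.2.2.1).mpr (Or.inl hvw)
            simpa using this
      by_cases hadds : adds = []
      · have hveq : st.2.1 = v := by
          apply grid_ext N M _ _ hshape' hShape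
          intro a b ha hb
          have hiff := hB (a : Int) (b : Int) (Int.natCast_nonneg a) (Int.natCast_nonneg b)
          rw [hadds] at hiff
          rw [Bool.eq_iff_iff]
          constructor
          · intro h
            rcases hiff.mp h with h | h
            · exact h
            · exact absurd h (List.not_mem_nil)
          · intro h
            exact hiff.mpr (Or.inl h)
        show runB N M tunnel k st.1 st.2.1 st.2.2 = runR N M tunnel (k + 1) v
        rw [hrunR, if_pos (by rw [hgrid, hveq]), hst1, hadds, runB_empty, hcnt', hveq]
      · have hne : relaxGrid N M tunnel v ≠ v := by
          rw [hgrid]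
          intro heq
          obtain ⟨w0, adds', rfl⟩ := List.exists_cons_of_ne_nil hadds
          obtain ⟨hiw, hvw, _⟩ := hC w0 List.mem_cons_self
          have h1 : vGetB st.2.1 w0.1 w0.2 = true :=
            (hB w0.1 w0.2 hiw.1 hiw.2.2.1).mpr (Or.inr (by simp))
          rw [heq, hvw] at h1
          exact absurd h1 (by decide)
        show runB N M tunnel k st.1 st.2.1 st.2.2 = runR N M tunnel (k + 1) v
        rw [hrunR, if_neg hne, hgrid, hst1]
        exact ih adds st.2.1 st.2.2 hInv'

-- initial-grid facts
lemma vGetB_replicate_false (n m : Nat) (i j : Int) (hi : i.toNat < n) (hj : j.toNat < m) :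
    vGetB (List.replicate n (List.replicate m false)) i j = false := by
  unfold vGetB
  have h1 : (List.replicate n (List.replicate m false)).getD i.toNat [] = List.replicate m false := by
    rw [List.getD_eq_getElem?_getD, List.getElem?_replicate, if_pos hi]
    rfl
  rw [h1, List.getD_eq_getElem?_getD, List.getElem?_replicate, if_pos hj]
  rfl

lemma popcount_init (n m : Nat) (i j : Int) (hi : i.toNat < n) (hj : j.toNat < m) :
    popcount (vSetB (List.replicate n (List.replicate m false)) i j) = 1 := by
  rw [popcount_vSetB _ _ _ (vGetB_replicate_false n m i j hi hj)]
  simp [popcount, List.map_replicate]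

lemma shaped_replicate (N M : Int) :
    Shaped N M (List.replicate N.toNat (List.replicate M.toNat false)) := by
  refine ⟨by simp, ?_⟩
  intro row h
  rw [List.eq_of_mem_replicate h]
  simp

-- ===== VERDICT (by name: the statement is the Claim_ definition above) =====
theorem bfs_spec : Claim_equal_bfs := by
  intro r c L N M tunnel _ hpre
  show bfs r c L N M tunnel = bfs_alt r c L N M tunnel
  have hN1 : 1 ≤ N := by rcases hpre with ⟨_, h1, h2, _⟩ | ⟨h1, h2, _⟩ <;> omega
  have hM1 : 1 ≤ M := by
    rcases hpre with ⟨_, _, _, h1, h2⟩ | ⟨_, _, h1, h2, _⟩ <;> omega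
  unfold bfs bfs_alt
  by_cases hL : L ≤ 1
  · have hrN : r.toNat < N.toNat := by
      rcases hpre with ⟨_, h1, h2, _⟩ | ⟨h1, h2, _⟩ <;> omega
    have hcM : c.toNat < M.toNat := by
      rcases hpre with ⟨_, _, _, h1, h2⟩ | ⟨_, _, h1, h2, _⟩ <;> omega
    rw [show (L - 1).toNat = 0 from by omega]
    rw [runA_eq_runW L N M tunnel _ _ _ _ (by simp)]
    rw [show ([(r, c, 1)] : List (Int × Int × Int)) = tagT 1 [(r, c)] from rfl,
      runW_drain L N M tunnel 1 hL]
    show (1 : Int) = popcount _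
    rw [popcount_init N.toNat M.toNat r c hrN hcM]
  · rcases hpre with ⟨hL1, _⟩ | ⟨hr0, hrN, hc0, hcM, _, _, _⟩
    · omega
    rw [runA_eq_runW L N M tunnel _ _ _ _ (by simp)]
    rw [show ([(r, c, 1)] : List (Int × Int × Int)) = tagT 1 [(r, c)] from rfl]
    rw [main_sim L N M tunnel (L - 1).toNat 1 rfl [(r, c)] _ 1]
    rw [toB_init]
    apply part2 N M tunnel (by omega) (by omega)
    have hz : vGetB (List.replicate N.toNat (List.replicate M.toNat false)) r c = false :=
      vGetB_replicate_false N.toNat M.toNat r c (by omega) (by omega)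
    refine ⟨shaped_vSetB N M _ r c (shaped_replicate N M), ?_, ?_, ?_⟩
    · rw [popcount_init N.toNat M.toNat r c (by omega) (by omega)]
    · intro w hw
      rw [List.mem_singleton] at hw
      subst hw
      refine ⟨⟨hr0, hrN, hc0, hcM⟩, ?_⟩
      rw [vGetB_vSetB _ _ _ hz]
      simp
    · intro u w hiu _ hvu hunot _
      exfalso
      rw [vGetB_vSetB _ _ _ hz] at hvu
      have hrepl : vGetB (List.replicate N.toNat (List.replicate M.toNat false)) u.1 u.2 = false :=
        vGetB_replicate_false N.toNat M.toNat u.1 u.2 (by obtain ⟨a1, a2, _⟩ := hiu; omega)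
          (by obtain ⟨_, _, a3, a4⟩ := hiu; omega)
      rw [hrepl] at hvu
      simp only [Bool.or_false, Bool.and_eq_true, beq_iff_eq] at hvu
      apply hunot
      rw [List.mem_singleton]
      obtain ⟨a1, a2, a3, a4⟩ := hiu
      have : u.1 = r ∧ u.2 = c := by omega
      exact Prod.ext this.1 this.2
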